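-- pv_equiv track=rewrite | github.com/Deven-14/leetcode | 1342. Number of Steps to Reduce a Number to Zero/solution.py | numberOfSteps
-- ===== SOURCE A (Python) =====
-- def numberOfSteps(num: int) -> int:
--     if num == 0:
--         return 0
--     count = 0
--     while num:
--         count += 1 + (num & 1) # add 1 if odd
--         num >>= 1 # // 2
--
--     return count-1
-- ===== SOURCE B (Python) =====
-- def numberOfSteps(num: int) -> int:
--     if num == 0:
--         return 0
--     return num.bit_length() + bin(num).count('1') - 1
-- ===== Notes on version B (the rewrite author's own statement) =====
-- stated objective: simpler
-- what changed: Replaces the while-loop over the bits by a closed-form expression: bit_length counts the halving steps and popcount the subtract-on-odd steps, minus one for the final shift.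
-- outside the precondition, e.g. on numberOfSteps(-1): A does not finish within the time limit, B returns 1
import Mathlib
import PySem

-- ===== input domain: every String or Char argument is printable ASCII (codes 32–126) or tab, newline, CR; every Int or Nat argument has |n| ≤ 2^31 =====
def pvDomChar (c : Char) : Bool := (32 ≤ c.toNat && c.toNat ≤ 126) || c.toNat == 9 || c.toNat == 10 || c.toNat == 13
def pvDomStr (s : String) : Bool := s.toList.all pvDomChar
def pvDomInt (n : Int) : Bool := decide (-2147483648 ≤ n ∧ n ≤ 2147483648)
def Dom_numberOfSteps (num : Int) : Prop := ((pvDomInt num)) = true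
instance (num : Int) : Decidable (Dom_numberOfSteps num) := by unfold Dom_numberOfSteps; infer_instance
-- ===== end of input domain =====

-- B replaces A's while-loop by a closed-form expression over the bit representation (bit_length + popcount - 1); same value on all num ≥ 0.


-- ===== PORT A =====
-- the 'while num:' loop; for num < 0 the Python loop never terminates (num >>= 1 stalls at -1),
-- those inputs are excluded by Pre_ and the guard below only makes the recursion total.
def numberOfStepsLoop (num count : Int) : Int :=
  if num = 0 then count
  else if num < 0 then count  -- unreachable under Pre_: Python diverges here
  else numberOfStepsLoop (num >>> (1:Nat)) (count + 1 + PySem.Int.band num 1)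
termination_by num.toNat
decreasing_by
  have h0 : (0:Int) < num := by omega
  have : num >>> (1:Nat) = num / 2 := by simp [Int.shiftRight_eq_div_pow]
  rw [this]; omega

def numberOfSteps (num : Int) : Int :=
  if num = 0 then 0
  else numberOfStepsLoop num 0 - 1

-- ===== PORT B =====
def numberOfSteps_alt (num : Int) : Int :=
  if num = 0 then 0
  else (PySem.Int.bitLength num : Int) + (PySem.Int.bitCount num : Int) - 1

-- ===== PRECONDITION & SPEC =====
-- Pre_ excludes num < 0, on which Python A never terminates (num >>= 1 stalls at -1).
def Pre_numberOfSteps (num : Int) : Prop := 0 ≤ num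
instance (num : Int) : Decidable (Pre_numberOfSteps num) := by unfold Pre_numberOfSteps; infer_instance
def pvWitness_numberOfSteps : Int := (14)

def Spec_numberOfSteps (num : Int) (out : Int) : Prop := out = numberOfSteps_alt num
instance (num : Int) (out : Int) : Decidable (Spec_numberOfSteps num out) := by unfold Spec_numberOfSteps; infer_instance

-- ===== CLAIM (what is proved, stated in full; the proofs are below) =====
def Claim_equal_numberOfSteps : Prop := ∀ (num : Int), Dom_numberOfSteps num → Pre_numberOfSteps num → Spec_numberOfSteps num (numberOfSteps num)

-- ===== LEMMAS AND PROOFS =====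

theorem numberOfStepsLoop_pos_aux (k : Nat) : ∀ (num : Int), num.toNat ≤ k → 0 < num →
    ∀ c, numberOfStepsLoop num c = c + (PySem.Int.bitLength num : Int) + (PySem.Int.bitCount num : Int) := by
  induction k with
  | zero => intro num hk hpos; omega
  | succ k ih =>
    intro num hk hpos c
    have h1 : ¬ num = 0 := by omega
    have h2 : ¬ num < 0 := by omega
    have hs : num >>> (1:Nat) = num / 2 := by simp [Int.shiftRight_eq_div_pow]
    have hdiv : num / 2 = PySem.Int.floordiv num 2 :=
      (PySem.Int.floordiv_eq_ediv_of_pos (a := num) (by norm_num)).symm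
    rw [numberOfStepsLoop]
    simp only [if_neg h1, if_neg h2]
    by_cases hz : num >>> (1:Nat) = 0
    · -- num = 1
      have h1' : num = 1 := by
        rw [hs] at hz; omega
      subst h1'
      rw [numberOfStepsLoop]
      norm_num
      rw [show PySem.Int.bitLength 1 = 1 from by decide,
          show PySem.Int.bitCount 1 = 1 from by decide]
      norm_num
      intro h
      exact absurd hz h
    · have hpos2 : 0 < num >>> (1:Nat) := by
        rw [hs] at hz ⊢; omega
      have hle : (num >>> (1:Nat)).toNat ≤ k := by rw [hs]; omega
      rw [ih _ hle hpos2 _]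
      have hbl := PySem.Int.bitLength_of_pos (n := num) hpos
      have hbc := PySem.Int.bitCount_of_pos (n := num) hpos
      rw [hbl, hbc, PySem.Int.band_one, hs, hdiv]
      have hmod : 0 ≤ PySem.Int.mod num 2 := PySem.Int.mod_nonneg _ (by norm_num)
      push_cast
      omega

theorem numberOfStepsLoop_pos (n : Int) (hn : 0 < n) (c : Int) :
    numberOfStepsLoop n c = c + (PySem.Int.bitLength n : Int) + (PySem.Int.bitCount n : Int) :=
  numberOfStepsLoop_pos_aux n.toNat n le_rfl hn c

-- ===== VERDICT (by name: the statement is the Claim_ definition above) =====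
theorem numberOfSteps_spec : Claim_equal_numberOfSteps := by
  intro num _ hpre
  unfold Spec_numberOfSteps numberOfSteps numberOfSteps_alt
  by_cases h0 : num = 0
  · simp [h0]
  · have hpos : 0 < num := by unfold Pre_numberOfSteps at hpre; omega
    rw [if_neg h0, if_neg h0, numberOfStepsLoop_pos num hpos 0]
    omega
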